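-- pv_equiv track=rewrite | github.com/TobiasChen/AdventOfCode | 2024/02.py | isDeacreasing
-- ===== SOURCE A (Python) =====
-- def isDeacreasing(lis: list, stripped = False, excersiseOne=True):
--     for i, val in enumerate(lis[0:-1]):
--         if val <= lis[i+1] or (val - lis[i+1]) > 3:
--             if excersiseOne or stripped:
--                 return False
--             else:
--                 return isDeacreasing(lis[0:i] + lis[i+1:], stripped=True, excersiseOne=excersiseOne) or isDeacreasing(lis[0:i+1] + lis[i+2:], stripped=True, excersiseOne=excersiseOne)
--     return True
-- ===== SOURCE B (Python) =====
-- def isDeacreasing(lis: list, stripped = False, excersiseOne=True):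
--     def ok(l):
--         return all(x > y and x - y <= 3 for x, y in zip(l, l[1:]))
--     if ok(lis):
--         return True
--     if excersiseOne or stripped:
--         return False
--     return any(ok(lis[:j] + lis[j+1:]) for j in range(len(lis)))
-- ===== Notes on version B (the rewrite author's own statement) =====
-- stated objective: idiomatic
-- what changed: A scans for the first violating pair and recursively retries with only that pair's two candidate removals; B is the standard AoC idiom: a pairwise all() safety check plus a brute-force any() over every single-element removal (equivalent because removing any other index leaves the first violating pair adjacent).
import Mathlib
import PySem

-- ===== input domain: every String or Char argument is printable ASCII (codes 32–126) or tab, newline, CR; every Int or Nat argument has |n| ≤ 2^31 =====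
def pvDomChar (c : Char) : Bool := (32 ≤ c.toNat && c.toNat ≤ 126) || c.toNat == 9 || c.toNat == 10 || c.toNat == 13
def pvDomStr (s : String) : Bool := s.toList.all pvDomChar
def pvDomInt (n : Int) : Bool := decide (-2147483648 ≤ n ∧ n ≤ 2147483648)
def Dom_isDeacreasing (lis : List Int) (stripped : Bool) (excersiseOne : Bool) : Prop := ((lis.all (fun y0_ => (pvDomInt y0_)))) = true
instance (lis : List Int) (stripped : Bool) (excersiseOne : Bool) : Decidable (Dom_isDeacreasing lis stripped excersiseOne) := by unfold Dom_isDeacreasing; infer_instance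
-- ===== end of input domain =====

-- B replaces A's first-violation targeted repair with the idiomatic all()-check plus
-- brute-force any() over every single-element removal; return values proved equal.

-- ===== PORT A =====
-- A's loop over enumerate(lis[0:-1]); i is the loop index. lis[0:i]+lis[i+1:] and
-- lis[0:i+1]+lis[i+2:] (nonnegative in-range slices) are take/drop appends.
def isDeacreasingGo (lis : List Int) (stripped : Bool) (excersiseOne : Bool) (i : Nat) : Bool :=
  if h : i + 1 < lis.length then
    if lis[i]'(by omega) ≤ lis[i+1]'h || lis[i]'(by omega) - lis[i+1]'h > 3 then
      if excersiseOne || stripped then false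
      else isDeacreasingGo (lis.take i ++ lis.drop (i+1)) true excersiseOne 0
        || isDeacreasingGo (lis.take (i+1) ++ lis.drop (i+2)) true excersiseOne 0
    else isDeacreasingGo lis stripped excersiseOne (i+1)
  else true
termination_by (lis.length, lis.length - i)
decreasing_by
  · apply Prod.Lex.left; simp; omega
  · apply Prod.Lex.left; simp; omega
  · apply Prod.Lex.right; omega

def isDeacreasing (lis : List Int) (stripped : Bool) (excersiseOne : Bool) : Bool :=
  isDeacreasingGo lis stripped excersiseOne 0

-- ===== PORT B =====
-- all(x > y and x - y <= 3 for x, y in zip(l, l[1:]))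
def okAlt : List Int → Bool
  | x :: y :: rest => (decide (x > y) && decide (x - y ≤ 3)) && okAlt (y :: rest)
  | _ => true

def isDeacreasing_alt (lis : List Int) (stripped : Bool) (excersiseOne : Bool) : Bool :=
  if okAlt lis then true
  else if excersiseOne || stripped then false
  else (List.range lis.length).any (fun j => okAlt (lis.take j ++ lis.drop (j+1)))

-- ===== PRECONDITION & SPEC =====
def Spec_isDeacreasing (lis : List Int) (stripped : Bool) (excersiseOne : Bool) (out : Bool) : Prop := out = isDeacreasing_alt lis stripped excersiseOne
instance (lis : List Int) (stripped : Bool) (excersiseOne : Bool) (out : Bool) : Decidable (Spec_isDeacreasing lis stripped excersiseOne out) := by unfold Spec_isDeacreasing; infer_instance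

-- ===== CLAIM (what is proved, stated in full; the proofs are below) =====
def Claim_equal_isDeacreasing : Prop := ∀ (lis : List Int) (stripped : Bool) (excersiseOne : Bool), Dom_isDeacreasing lis stripped excersiseOne → Spec_isDeacreasing lis stripped excersiseOne (isDeacreasing lis stripped excersiseOne)

-- ===== LEMMAS AND PROOFS =====

lemma okAlt_short (l : List Int) (h : l.length ≤ 1) : okAlt l = true := by
  match l with
  | [] => rfl
  | [_] => rfl
  | _ :: _ :: _ => simp at h

lemma okAlt_iff : ∀ (l : List Int),
    okAlt l = true ↔ ∀ j : Nat, (h : j + 1 < l.length) →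
      l[j]'(by omega) > l[j+1]'h ∧ l[j]'(by omega) - l[j+1]'h ≤ 3
  | [] => by simp [okAlt]
  | [x] => by simp [okAlt]
  | x :: y :: rest => by
    rw [show okAlt (x :: y :: rest)
        = ((decide (x > y) && decide (x - y ≤ 3)) && okAlt (y :: rest)) from rfl,
      Bool.and_eq_true, Bool.and_eq_true, decide_eq_true_iff, decide_eq_true_iff,
      okAlt_iff (y :: rest)]
    constructor
    · rintro ⟨⟨h1, h2⟩, ih⟩ j hj
      match j with
      | 0 => exact ⟨h1, h2⟩
      | j + 1 => simpa using ih j (by simpa using hj)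
    · intro h
      refine ⟨⟨(h 0 (by simp)).1, (h 0 (by simp)).2⟩, fun j hj => ?_⟩
      simpa using h (j + 1) (by simpa using hj)

lemma remove_length (l : List Int) (j : Nat) (h : j < l.length) :
    (l.take j ++ l.drop (j+1)).length = l.length - 1 := by
  simp; omega

lemma remove_getElem (l : List Int) (j k : Nat) (hj : j < l.length)
    (hk : k < (l.take j ++ l.drop (j+1)).length) :
    (l.take j ++ l.drop (j+1))[k] = if h : k < j then l[k]'(by rw [remove_length l j hj] at hk; omega)
      else l[k+1]'(by rw [remove_length l j hj] at hk; omega) := by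
  simp only [← List.eraseIdx_eq_take_drop_succ, List.getElem_eraseIdx]

-- stripped=True (or excersiseOne) branch: A's scan is just the pairwise check
lemma goStrip (l : List Int) (s e : Bool) (he : (e || s) = true) :
    ∀ i, isDeacreasingGo l s e i = okAlt (l.drop i) := by
  suffices H : ∀ n i, l.length - i ≤ n → isDeacreasingGo l s e i = okAlt (l.drop i) from
    fun i => H l.length i (by omega)
  intro n
  induction n with
  | zero =>
    intro i hi
    rw [isDeacreasingGo, dif_neg (by omega), okAlt_short _ (by simp; omega)]
  | succ n ih =>
    intro i hi
    rw [isDeacreasingGo]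
    by_cases h : i + 1 < l.length
    · rw [dif_pos h]
      have hd : l.drop i = l[i]'(by omega) :: l[i+1]'h :: l.drop (i+2) := by
        rw [List.drop_eq_getElem_cons (show i < l.length by omega),
          List.drop_eq_getElem_cons h]
      rw [hd]
      show _ = ((decide _ && decide _) && okAlt _)
      rw [he, if_pos (rfl : true = true)]
      split_ifs with hc
      · -- violating pair, (e || s) = true
        have hc' : l[i]'(by omega) ≤ l[i+1]'h ∨ l[i]'(by omega) - l[i+1]'h > 3 := by
          simpa using hc
        rcases hc' with hle | hgt
        · have : ¬ (l[i]'(by omega) > l[i+1]'h) := by omega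
          simp [this]
        · have : ¬ (l[i]'(by omega) - l[i+1]'h ≤ 3) := by omega
          simp [this]
      · -- good pair: recurse
        have hc' : l[i]'(by omega) > l[i+1]'h ∧ l[i]'(by omega) - l[i+1]'h ≤ 3 := by
          simp at hc; omega
        rw [ih (i + 1) (by omega)]
        rw [List.drop_eq_getElem_cons h]
        simp [hc'.1, hc'.2]
    · rw [dif_neg h, okAlt_short _ (by simp; omega)]

lemma any_range_two (n i : Nat) (f : Nat → Bool) (hi : i + 1 < n)
    (hf : ∀ j, j < n → j ≠ i → j ≠ i + 1 → f j = false) :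
    (List.range n).any f = (f i || f (i+1)) := by
  rw [Bool.eq_iff_iff]
  simp only [List.any_eq_true, List.mem_range, Bool.or_eq_true]
  constructor
  · rintro ⟨j, hj, hfj⟩
    by_cases h1 : j = i
    · exact Or.inl (h1 ▸ hfj)
    by_cases h2 : j = i + 1
    · exact Or.inr (h2 ▸ hfj)
    · rw [hf j hj h1 h2] at hfj; exact absurd hfj (by simp)
  · rintro (h | h)
    · exact ⟨i, by omega, h⟩
    · exact ⟨i + 1, by omega, h⟩

-- removing an index other than i, i+1 leaves the violating pair (i, i+1) adjacent
lemma remove_other_bad (l : List Int) (i j : Nat) (hi : i + 1 < l.length)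
    (hbad : ¬ (l[i]'(by omega) > l[i+1]'hi ∧ l[i]'(by omega) - l[i+1]'hi ≤ 3))
    (hj : j < l.length) (h1 : j ≠ i) (h2 : j ≠ i + 1) :
    okAlt (l.take j ++ l.drop (j+1)) = false := by
  rcases Bool.eq_false_or_eq_true (okAlt (l.take j ++ l.drop (j+1))) with h | h
  swap
  · exact h
  exfalso
  have hlen := remove_length l j hj
  by_cases hji : j < i
  · obtain ⟨k, rfl⟩ : ∃ k, i = k + 1 := ⟨i - 1, by omega⟩
    have hp := (okAlt_iff _).mp h k (by rw [hlen]; omega)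
    rw [remove_getElem l j k hj, remove_getElem l j (k+1) hj,
      dif_neg (by omega), dif_neg (by omega)] at hp
    exact hbad ⟨hp.1, hp.2⟩
  · have hp := (okAlt_iff _).mp h i (by rw [hlen]; omega)
    rw [remove_getElem l j i hj, remove_getElem l j (i+1) hj,
      dif_pos (by omega), dif_pos (by omega)] at hp
    exact hbad ⟨hp.1, hp.2⟩

lemma goMain (l : List Int) : ∀ i,
    (∀ j : Nat, (h : j + 1 < l.length) → j < i →
      l[j]'(by omega) > l[j+1]'h ∧ l[j]'(by omega) - l[j+1]'h ≤ 3) →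
    isDeacreasingGo l false false i = isDeacreasing_alt l false false := by
  suffices H : ∀ n i, l.length - i ≤ n →
      (∀ j : Nat, (h : j + 1 < l.length) → j < i →
        l[j]'(by omega) > l[j+1]'h ∧ l[j]'(by omega) - l[j+1]'h ≤ 3) →
      isDeacreasingGo l false false i = isDeacreasing_alt l false false from
    fun i hyp => H l.length i (by omega) hyp
  intro n
  induction n with
  | zero =>
    intro i hi hyp
    have hok : okAlt l = true := (okAlt_iff l).mpr (fun j hj => hyp j hj (by omega))
    rw [isDeacreasingGo, dif_neg (by omega), isDeacreasing_alt, if_pos hok]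
  | succ n ih =>
    intro i hi hyp
    by_cases h : i + 1 < l.length
    · rw [isDeacreasingGo, dif_pos h]
      simp only [Bool.or_self, Bool.false_eq_true, if_false]
      split_ifs with hc
      · -- first violating pair at i
        have hbad : ¬ (l[i]'(by omega) > l[i+1]'h ∧ l[i]'(by omega) - l[i+1]'h ≤ 3) := by
          simp at hc; omega
        have hokf : okAlt l = false := by
          rcases Bool.eq_false_or_eq_true (okAlt l) with h' | h'
          · exact absurd ((okAlt_iff l).mp h' i h) hbad
          · exact h'
        rw [isDeacreasing_alt, if_neg (by simp [hokf]), if_neg (by simp)]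
        rw [goStrip _ _ _ rfl 0, goStrip _ _ _ rfl 0, List.drop_zero, List.drop_zero]
        rw [any_range_two l.length i _ h
          (fun j hj h1 h2 => remove_other_bad l i j h hbad hj h1 h2)]
      · -- good pair: continue the scan
        have hc' : l[i]'(by omega) > l[i+1]'h ∧ l[i]'(by omega) - l[i+1]'h ≤ 3 := by
          simp at hc; omega
        refine ih (i + 1) (by omega) (fun j hj hji => ?_)
        by_cases hj' : j < i
        · exact hyp j hj hj'
        · obtain rfl : j = i := by omega
          exact hc'
    · have hok : okAlt l = true :=
        (okAlt_iff l).mpr (fun j hj => hyp j hj (by omega))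
      rw [isDeacreasingGo, dif_neg h, isDeacreasing_alt, if_pos hok]

-- ===== VERDICT (by name: the statement is the Claim_ definition above) =====
theorem isDeacreasing_spec : Claim_equal_isDeacreasing := by
  intro lis s e _
  unfold Spec_isDeacreasing isDeacreasing
  cases s <;> cases e
  · exact goMain lis 0 (by omega)
  · rw [goStrip lis false true rfl 0, List.drop_zero]
    unfold isDeacreasing_alt
    cases h : okAlt lis <;> simp [h]
  · rw [goStrip lis true false rfl 0, List.drop_zero]
    unfold isDeacreasing_alt
    cases h : okAlt lis <;> simp [h]
  · rw [goStrip lis true true rfl 0, List.drop_zero]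
    unfold isDeacreasing_alt
    cases h : okAlt lis <;> simp [h]
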